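-- pv_equiv track=rewrite | github.com/stylus-diffusion/stylus | stylus/utils/masking.py | _cross_product_all_keys
-- ===== SOURCE A (Python) =====
-- from itertools import product
--
-- def _cross_product_all_keys(data_dict):
--
--     def generate_cross_product_masks(data_dict):
--         result_masks = {}
--         for key, values in data_dict.items():
--             if not values:  # If the list is empty, skip
--                 continue
--             # All possible boolean values for the length of the list
--             all_combinations = list(product([False, True], repeat=len(values)))
--             # Convert each combination to the required format (list of True/False)
--             masks = [list(combination) for combination in all_combinations]
--             result_masks[key] = masks
--         return result_masks
--
--     # Generate masks for each key
--     individual_masks = generate_cross_product_masks(data_dict)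
--
--     # Extract keys and corresponding masks
--     keys = list(individual_masks.keys())
--     mask_lists = [individual_masks[key] for key in keys]
--
--     # Compute the cross product of all mask lists
--     cross_product = list(product(*mask_lists))
--
--     # Format the result as a list of dictionaries
--     formatted_result = []
--     for combination in cross_product:
--         combination_dict = {key: mask for key, mask in zip(keys, combination)}
--         formatted_result.append(combination_dict)
--
--     return formatted_result
-- ===== SOURCE B (Python) =====
-- def _cross_product_all_keys(data_dict):
--     # Incremental fold: start from one empty dict and, for each key with a
--     # non-empty value list, extend every partial dict with each of that key's
--     # 2**n boolean masks (enumerated arithmetically, most-significant bit first).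
--     running = [{}]
--     for key, values in data_dict.items():
--         n = len(values)
--         if n == 0:
--             continue
--         masks = [[(i // 2 ** (n - 1 - j)) % 2 == 1 for j in range(n)]
--                  for i in range(2 ** n)]
--         running = [{**partial, key: mask} for partial in running for mask in masks]
--     return running
-- ===== Notes on version B (the rewrite author's own statement) =====
-- stated objective: simpler
-- what changed: B replaces A's two-phase design (build a key->mask-list dict with itertools.product(repeat=n) per key, take itertools.product across the mask lists, then reformat tuples into dicts) by a single incremental fold: a running list of partial dicts starting from a single empty dict is extended key by key, with each key's 2**n masks enumerated arithmetically by bit index instead of by recursive product.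
import Mathlib
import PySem

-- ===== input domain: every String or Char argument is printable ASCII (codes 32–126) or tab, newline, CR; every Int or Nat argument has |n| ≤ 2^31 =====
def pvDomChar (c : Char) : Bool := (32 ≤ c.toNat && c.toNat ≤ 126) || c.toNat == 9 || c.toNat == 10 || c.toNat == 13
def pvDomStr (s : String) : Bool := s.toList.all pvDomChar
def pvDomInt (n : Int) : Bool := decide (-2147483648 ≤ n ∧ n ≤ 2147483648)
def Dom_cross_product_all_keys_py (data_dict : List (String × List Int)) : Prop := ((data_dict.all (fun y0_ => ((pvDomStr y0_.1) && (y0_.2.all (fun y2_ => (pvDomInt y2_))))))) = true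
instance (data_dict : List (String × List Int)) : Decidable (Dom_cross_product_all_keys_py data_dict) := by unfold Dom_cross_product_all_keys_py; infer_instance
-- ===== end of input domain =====

-- B rebuilds the cross product incrementally (fold over the keys with a running
-- list of partial dicts, masks enumerated arithmetically) instead of A's
-- two-phase mask-dict + itertools.product; objective: simpler, same cost.

-- ===== PORT A =====

-- Python dict assignment d[k] = v on an association list: overwrite in place, new keys append.
def pvInsert {α : Type} (l : List (String × α)) (k : String) (v : α) : List (String × α) :=
  match l with
  | [] => [(k, v)]
  | (k', v') :: t => if k' = k then (k, v) :: t else (k', v') :: pvInsert t k v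

-- Python dict lookup d[k] (first match; A only looks up keys that are present).
def pvGetD {α : Type} (l : List (String × α)) (k : String) (d : α) : α :=
  match l with
  | [] => d
  | (k', v) :: t => if k' = k then v else pvGetD t k d

-- itertools.product([False, True], repeat=n)  (first coordinate varies slowest)
def pvMaskProd : Nat → List (List Bool)
  | 0 => [[]]
  | n + 1 => [false, true].flatMap (fun b => (pvMaskProd n).map (fun m => b :: m))

-- itertools.product(*lists)  (last list varies fastest)
def pvProd {α : Type} : List (List α) → List (List α)
  | [] => [[]]
  | l :: ls => l.flatMap (fun x => (pvProd ls).map (fun t => x :: t))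

def cross_product_all_keys_py (data_dict : List (String × List Int)) : List (List (String × List Bool)) :=
  -- generate_cross_product_masks
  let individual_masks : List (String × List (List Bool)) :=
    data_dict.foldl (fun rm kv =>
      if kv.2 = [] then rm
      else pvInsert rm kv.1 ((pvMaskProd kv.2.length).map (fun c => c))) []
  let keys := individual_masks.map (fun kv => kv.1)
  let mask_lists := keys.map (fun k => pvGetD individual_masks k [])
  let cross_product := pvProd mask_lists
  cross_product.map (fun combination =>
    (keys.zip combination).foldl (fun d km => pvInsert d km.1 km.2) [])

-- ===== PORT B =====

def cross_product_all_keys_py_alt (data_dict : List (String × List Int)) : List (List (String × List Bool)) :=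
  data_dict.foldl (fun running kv =>
    let n : Nat := kv.2.length
    if n = 0 then running
    else
      -- [[(i // 2 ** (n - 1 - j)) % 2 == 1 for j in range(n)] for i in range(2 ** n)]
      -- the exponent n - 1 - j is a nonnegative int (0 ≤ j < n), so Int.toNat is exact here
      let masks := (PySem.List.pyRange 0 ((2 : Int) ^ n) 1).map (fun i =>
        (PySem.List.pyRange 0 (n : Int) 1).map (fun j =>
          PySem.Int.mod (PySem.Int.floordiv i ((2 : Int) ^ ((n : Int) - 1 - j).toNat)) 2 == 1))
      running.flatMap (fun partial_ => masks.map (fun m => pvInsert partial_ kv.1 m)))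
    [[]]

-- ===== PRECONDITION & SPEC =====
-- Pre_ excludes association lists with duplicate keys: those represent no Python dict
-- (A's argument is a dict, whose keys are necessarily distinct).
def Pre_cross_product_all_keys_py (data_dict : List (String × List Int)) : Prop :=
  (data_dict.map (fun kv => kv.1)).Nodup
instance (data_dict : List (String × List Int)) : Decidable (Pre_cross_product_all_keys_py data_dict) := by
  unfold Pre_cross_product_all_keys_py; infer_instance
def pvWitness_cross_product_all_keys_py : (List (String × List Int)) := [("a", [1, 2]), ("b", [])]

def Spec_cross_product_all_keys_py (data_dict : List (String × List Int)) (out : List (List (String × List Bool))) : Prop := out = cross_product_all_keys_py_alt data_dict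
instance (data_dict : List (String × List Int)) (out : List (List (String × List Bool))) : Decidable (Spec_cross_product_all_keys_py data_dict out) := by unfold Spec_cross_product_all_keys_py; infer_instance

-- ===== CLAIM (what is proved, stated in full; the proofs are below) =====
def Claim_equal_cross_product_all_keys_py : Prop := ∀ (data_dict : List (String × List Int)), Dom_cross_product_all_keys_py data_dict → Pre_cross_product_all_keys_py data_dict → Spec_cross_product_all_keys_py data_dict (cross_product_all_keys_py data_dict)

-- ===== LEMMAS AND PROOFS =====

-- the common normal form of both programs: fold the keys, skipping empty value lists
def pvProdZip : List (String × List Int) → List (List (String × List Bool))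
  | [] => [[]]
  | (k, v) :: t =>
    if v = [] then pvProdZip t
    else (pvMaskProd v.length).flatMap (fun m => (pvProdZip t).map (fun q => (k, m) :: q))

-- arithmetic bit row: element i of pvMaskProd n
def pvRow (n i : Nat) : List Bool :=
  (List.range n).map (fun j => decide ((i / 2 ^ (n - 1 - j)) % 2 = 1))

theorem pvRow_lo (n i : Nat) (hi : i < 2 ^ n) : pvRow (n + 1) i = false :: pvRow n i := by
  simp only [pvRow, List.range_succ_eq_map, List.map_cons, List.map_map]
  congr 1
  · have : i / 2 ^ n = 0 := Nat.div_eq_of_lt hi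
    simp [this]
  · apply List.map_congr_left
    intro j hj
    have hs : n - (j + 1) = n - 1 - j := by omega
    simp [Function.comp, hs]

theorem pvRow_hi (n i : Nat) (hi : i < 2 ^ n) : pvRow (n + 1) (2 ^ n + i) = true :: pvRow n i := by
  simp only [pvRow, List.range_succ_eq_map, List.map_cons, List.map_map]
  congr 1
  · have h0 : i / 2 ^ n = 0 := Nat.div_eq_of_lt hi
    have h1 : (2 ^ n + i) / 2 ^ n = 1 := by
      rw [Nat.add_div_left i (Nat.pos_of_ne_zero (by positivity))]
      omega
    simp [h1]
  · apply List.map_congr_left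
    intro j hj
    have hj' : j < n := List.mem_range.mp hj
    have hpow : 2 ^ n = 2 ^ (n - (n - 1 - j)) * 2 ^ (n - 1 - j) := by
      rw [← pow_add]; congr 1; omega
    have hdiv : (2 ^ n + i) / 2 ^ (n - 1 - j) = 2 ^ (n - (n - 1 - j)) + i / 2 ^ (n - 1 - j) := by
      rw [hpow, Nat.add_comm, Nat.add_mul_div_right _ _ (Nat.pos_of_ne_zero (by positivity)), Nat.add_comm]
    obtain ⟨c, hc⟩ : 2 ∣ 2 ^ (n - (n - 1 - j)) := dvd_pow_self 2 (by omega)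
    have key : ((2 ^ n + i) / 2 ^ (n - 1 - j)) % 2 = (i / 2 ^ (n - 1 - j)) % 2 := by
      rw [hdiv, hc]; omega
    have hexp : n + 1 - 1 - (j + 1) = n - 1 - j := by omega
    simp only [Function.comp, Nat.succ_eq_add_one, hexp, key]

theorem pvMaskProd_eq_rows (n : Nat) :
    pvMaskProd n = (List.range (2 ^ n)).map (pvRow n) := by
  induction n with
  | zero => simp [pvMaskProd, pvRow]
  | succ n ih =>
    have hsplit : List.range (2 ^ (n + 1)) =
        List.range (2 ^ n) ++ (List.range (2 ^ n)).map (fun i => 2 ^ n + i) := by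
      rw [pow_succ, mul_two, List.range_add]
    rw [hsplit, List.map_append, List.map_map]
    have h1 : List.map (pvRow (n + 1)) (List.range (2 ^ n))
        = List.map (fun i => false :: pvRow n i) (List.range (2 ^ n)) :=
      List.map_congr_left (fun i hi => pvRow_lo n i (List.mem_range.mp hi))
    have h2 : List.map (pvRow (n + 1) ∘ fun i => 2 ^ n + i) (List.range (2 ^ n))
        = List.map (fun i => true :: pvRow n i) (List.range (2 ^ n)) :=
      List.map_congr_left (fun i hi => pvRow_hi n i (List.mem_range.mp hi))
    rw [h1, h2]
    simp [pvMaskProd, ih, List.map_map, Function.comp_def]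

-- B's inline mask comprehension computes pvMaskProd
theorem pvNatCastBeqOne (x : Nat) : ((x : Int) == 1) = decide (x = 1) := by
  by_cases hx : x = 1 <;> simp [hx]

theorem pvMasksB_eq (n : Nat) :
    ((PySem.List.pyRange 0 ((2 : Int) ^ n) 1).map (fun i =>
      (PySem.List.pyRange 0 (n : Int) 1).map (fun j =>
        PySem.Int.mod (PySem.Int.floordiv i ((2 : Int) ^ ((n : Int) - 1 - j).toNat)) 2 == 1)))
    = pvMaskProd n := by
  rw [pvMaskProd_eq_rows]
  have hc : (2 : Int) ^ n = ((2 ^ n : Nat) : Int) := by push_cast; ring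
  rw [hc, PySem.List.pyRange_zero_natCast, PySem.List.pyRange_zero_natCast, List.map_map]
  apply List.map_congr_left
  intro i hi
  simp only [Function.comp, List.map_map, pvRow]
  apply List.map_congr_left
  intro j hj
  have hj' : j < n := List.mem_range.mp hj
  have hexp : (((n : Int) - 1 - (j : Int)).toNat) = n - 1 - j := by omega
  have hp : (2 : Int) ^ (n - 1 - j) = ((2 ^ (n - 1 - j) : Nat) : Int) := by push_cast; ring
  simp only [Function.comp, hexp, hp]
  rw [PySem.Int.floordiv_natCast]
  rw [show ((2 : Int)) = ((2 : Nat) : Int) from rfl, PySem.Int.mod_natCast]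
  exact pvNatCastBeqOne _

-- zip within a key: the A-side cross product of (key, masks) pairs
def pvPZ : List (String × List (List Bool)) → List (List (String × List Bool))
  | [] => [[]]
  | (k, ms) :: t => ms.flatMap (fun m => (pvPZ t).map (fun q => (k, m) :: q))

theorem pvInsert_of_not_mem {α : Type} (l : List (String × α)) (k : String) (v : α)
    (h : k ∉ l.map (fun p => p.1)) : pvInsert l k v = l ++ [(k, v)] := by
  induction l with
  | nil => rfl
  | cons hd t ih =>
    obtain ⟨k', v'⟩ := hd
    simp only [List.map_cons, List.mem_cons] at h
    push Not at h
    simp only [pvInsert, if_neg (fun he => h.1 (Eq.symm he)), List.cons_append]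
    rw [ih h.2]

-- A's first loop: with pairwise-distinct keys every insert appends
theorem pvAfold (l : List (String × List Int)) : ∀ acc : List (String × List (List Bool)),
    (l.map (fun kv => kv.1)).Nodup →
    (∀ kv ∈ l, kv.1 ∉ acc.map (fun p => p.1)) →
    l.foldl (fun rm kv => if kv.2 = [] then rm
        else pvInsert rm kv.1 ((pvMaskProd kv.2.length).map (fun c => c))) acc
      = acc ++ (l.filter (fun kv => decide (kv.2 ≠ []))).map
          (fun kv => (kv.1, (pvMaskProd kv.2.length).map (fun c => c))) := by
  induction l with
  | nil => intro acc _ _; simp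
  | cons hd t ih =>
    intro acc hnd hdisj
    obtain ⟨k, v⟩ := hd
    simp only [List.map_cons, List.nodup_cons] at hnd
    by_cases hv : v = []
    · subst hv
      simp only [List.foldl_cons, if_true, List.filter_cons]
      rw [ih acc hnd.2 (fun kv hkv => hdisj kv (List.mem_cons_of_mem _ hkv))]
      simp
    · simp only [List.foldl_cons, if_neg hv]
      rw [pvInsert_of_not_mem _ _ _ (hdisj (k, v) (List.mem_cons_self))]
      rw [ih _ hnd.2 ?_]
      · simp [hv]
      · intro kv hkv
        simp only [List.map_append, List.mem_append]
        push Not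
        refine ⟨hdisj kv (List.mem_cons_of_mem _ hkv), ?_⟩
        intro hc
        simp only [List.map_cons, List.map_nil, List.mem_singleton] at hc
        exact hnd.1 (hc ▸ List.mem_map_of_mem hkv)

-- looking every key of an association list with distinct keys back up returns the values
theorem pvGetD_keys {α : Type} (G : List (String × α)) (d : α)
    (h : (G.map (fun p => p.1)).Nodup) :
    (G.map (fun p => p.1)).map (fun k => pvGetD G k d) = G.map (fun p => p.2) := by
  induction G with
  | nil => rfl
  | cons hd t ih =>
    obtain ⟨k, v⟩ := hd
    simp only [List.map_cons, List.nodup_cons] at h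
    simp only [List.map_cons, pvGetD]
    congr 1
    rw [List.map_congr_left (g := fun k' => pvGetD t k' d) ?_, ih h.2]
    intro k' hk'
    have : k ≠ k' := fun he => h.1 (he ▸ hk')
    simp [this]

-- building a dict from pairs with distinct keys is the pair list itself
theorem pvZipFold (ps : List (String × List Bool)) : ∀ acc : List (String × List Bool),
    (ps.map (fun p => p.1)).Nodup →
    (∀ km ∈ ps, km.1 ∉ acc.map (fun p => p.1)) →
    ps.foldl (fun d km => pvInsert d km.1 km.2) acc = acc ++ ps := by
  induction ps with
  | nil => intro acc _ _; simp
  | cons hd t ih =>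
    intro acc hnd hdisj
    simp only [List.map_cons, List.nodup_cons] at hnd
    simp only [List.foldl_cons]
    rw [pvInsert_of_not_mem _ _ _ (hdisj hd (List.mem_cons_self))]
    rw [ih _ hnd.2 ?_]
    · simp
    · intro km hkm
      simp only [List.map_append, List.mem_append]
      push Not
      refine ⟨hdisj km (List.mem_cons_of_mem _ hkm), ?_⟩
      intro hc
      simp only [List.map_cons, List.map_nil, List.mem_singleton] at hc
      exact hnd.1 (hc ▸ List.mem_map_of_mem hkm)

-- A's product-then-zip equals the keyed cross product
theorem pvProd_zip (G : List (String × List (List Bool))) :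
    (pvProd (G.map (fun p => p.2))).map (fun comb => (G.map (fun p => p.1)).zip comb)
      = pvPZ G := by
  induction G with
  | nil => simp [pvProd, pvPZ]
  | cons hd t ih =>
    obtain ⟨k, ms⟩ := hd
    simp only [List.map_cons, pvProd, pvPZ, List.map_flatMap, List.map_map]
    refine congrArg ms.flatMap (funext fun x => ?_)
    rw [← ih, List.map_map]
    apply List.map_congr_left
    intro c hc
    simp [Function.comp]

theorem pvFlatMap_congr {α β : Type} (l : List α) (f g : α → List β)
    (h : ∀ a ∈ l, f a = g a) : l.flatMap f = l.flatMap g := by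
  induction l with
  | nil => rfl
  | cons hd t ih =>
    simp only [List.flatMap_cons]
    rw [h hd (List.mem_cons_self), ih (fun a ha => h a (List.mem_cons_of_mem _ ha))]

theorem pvProd_mem_length {α : Type} (ls : List (List α)) :
    ∀ c ∈ pvProd ls, c.length = ls.length := by
  induction ls with
  | nil => intro c hc; simp [pvProd] at hc; simp [hc]
  | cons l t ih =>
    intro c hc
    simp only [pvProd, List.mem_flatMap, List.mem_map] at hc
    obtain ⟨x, hx, c', hc', rfl⟩ := hc
    simp [ih c' hc']

theorem pvPZ_filter (l : List (String × List Int)) :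
    pvPZ ((l.filter (fun kv => decide (kv.2 ≠ []))).map
      (fun kv => (kv.1, (pvMaskProd kv.2.length).map (fun c => c)))) = pvProdZip l := by
  induction l with
  | nil => rfl
  | cons hd t ih =>
    obtain ⟨k, v⟩ := hd
    by_cases hv : v = []
    · subst hv
      simp only [List.filter_cons, pvProdZip]
      simpa using ih
    · rw [List.filter_cons_of_pos (by simpa using hv)]
      simp only [List.map_cons, pvPZ, List.map_id']
      simp only [pvProdZip, if_neg hv]
      simp only [List.map_id'] at ih
      rw [ih]

theorem pvBfold (l : List (String × List Int)) : ∀ acc : List (List (String × List Bool)),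
    (l.map (fun kv => kv.1)).Nodup →
    (∀ p ∈ acc, ∀ kv ∈ l, kv.1 ∉ p.map (fun q => q.1)) →
    l.foldl (fun running kv =>
      let n : Nat := kv.2.length
      if n = 0 then running
      else
        let masks := (PySem.List.pyRange 0 ((2 : Int) ^ n) 1).map (fun i =>
          (PySem.List.pyRange 0 (n : Int) 1).map (fun j =>
            PySem.Int.mod (PySem.Int.floordiv i ((2 : Int) ^ ((n : Int) - 1 - j).toNat)) 2 == 1))
        running.flatMap (fun partial_ => masks.map (fun m => pvInsert partial_ kv.1 m))) acc
      = acc.flatMap (fun p => (pvProdZip l).map (fun q => p ++ q)) := by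
  induction l with
  | nil => intro acc _ _; simp [pvProdZip]
  | cons hd t ih =>
    intro acc hnd hdisj
    obtain ⟨k, v⟩ := hd
    simp only [List.map_cons, List.nodup_cons] at hnd
    by_cases hv : v = []
    · subst hv
      simp only [List.foldl_cons, List.length_nil, if_true]
      rw [ih acc hnd.2 (fun p hp kv hkv => hdisj p hp kv (List.mem_cons_of_mem _ hkv))]
      simp [pvProdZip]
    · have hl : ¬ v.length = 0 := by simpa using hv
      simp only [List.foldl_cons, if_neg hl]
      rw [pvMasksB_eq v.length]
      have hstep : acc.flatMap (fun p => (pvMaskProd v.length).map (fun m => pvInsert p k m))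
          = acc.flatMap (fun p => (pvMaskProd v.length).map (fun m => p ++ [(k, m)])) := by
        apply pvFlatMap_congr
        intro p hp
        apply List.map_congr_left
        intro m _
        exact pvInsert_of_not_mem p k m (hdisj p hp (k, v) (List.mem_cons_self))
      rw [hstep, ih _ hnd.2 ?_]
      · simp only [pvProdZip, if_neg hv, List.flatMap_assoc, List.flatMap_map,
          List.map_flatMap, List.map_map, Function.comp_def, List.append_assoc,
          List.singleton_append]
      · intro p hp kv hkv
        simp only [List.mem_flatMap, List.mem_map] at hp
        obtain ⟨p', hp', m, _, rfl⟩ := hp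
        simp only [List.map_append, List.mem_append]
        push Not
        refine ⟨hdisj p' hp' kv (List.mem_cons_of_mem _ hkv), ?_⟩
        intro hc
        simp only [List.map_cons, List.map_nil, List.mem_singleton] at hc
        exact hnd.1 (hc ▸ List.mem_map_of_mem hkv)

theorem cross_product_all_keys_py_spec : Claim_equal_cross_product_all_keys_py := by
  intro dd _ hpre
  unfold Spec_cross_product_all_keys_py
  unfold Pre_cross_product_all_keys_py at hpre
  have hB : cross_product_all_keys_py_alt dd = pvProdZip dd := by
    simp only [cross_product_all_keys_py_alt]
    rw [pvBfold dd [[]] hpre ?_]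
    · simp
    · intro p hp kv _
      simp only [List.mem_singleton] at hp
      subst hp
      simp
  rw [hB]
  simp only [cross_product_all_keys_py]
  rw [pvAfold dd [] hpre (by simp), List.nil_append]
  set G := (dd.filter (fun kv => decide (kv.2 ≠ []))).map
    (fun kv => (kv.1, (pvMaskProd kv.2.length).map (fun c => c))) with hG
  have hGk : G.map (fun p => p.1) = (dd.filter (fun kv => decide (kv.2 ≠ []))).map (fun kv => kv.1) := by
    simp [hG, List.map_map, Function.comp_def]
  have hnodG : (G.map (fun p => p.1)).Nodup := by
    rw [hGk]
    exact hpre.sublist (List.filter_sublist.map _)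
  rw [pvGetD_keys G [] hnodG]
  have hA : (pvProd (G.map (fun p => p.2))).map (fun comb =>
        ((G.map (fun p => p.1)).zip comb).foldl (fun d km => pvInsert d km.1 km.2) [])
      = (pvProd (G.map (fun p => p.2))).map (fun comb => (G.map (fun p => p.1)).zip comb) := by
    apply List.map_congr_left
    intro comb hcomb
    have hlen : comb.length = G.length := by
      have h := pvProd_mem_length (G.map (fun p => p.2)) comb hcomb
      simpa using h
    have hfst : ((G.map (fun p => p.1)).zip comb).map (fun p => p.1) = G.map (fun p => p.1) := by
      apply List.map_fst_zip
      simp [hlen]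
    rw [pvZipFold _ [] (by rw [hfst]; exact hnodG) (by simp), List.nil_append]
  rw [hA, pvProd_zip G, hG, pvPZ_filter dd]
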